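-- pv_equiv track=rewrite | github.com/eddmann/advent-of-code | 2021/python/src/day23/solution-1.py | next_hallway_moves
-- ===== SOURCE A (Python) =====
-- import copy
--
-- AMPHIPOD_ENERGY_COST = {'A': 1, 'B': 10, 'C': 100, 'D': 1000}
--
-- ROOM_POSITION = {'A': 2, 'B': 4, 'C': 6, 'D': 8}
--
-- def next_hallway_moves(state, per_room):
--     hallway, rooms = state
--
--     for hall_pos, amphipod in enumerate(hallway):
--         if amphipod == '.':
--             continue
--
--         target_room = 'ABCD'.index(amphipod)
--         room_occupancy = len(rooms[target_room])
--
--         if room_occupancy == per_room: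
--             continue
--
--         if room_occupancy > 0 and any(pod != amphipod for pod in rooms[target_room]):
--             continue
--
--         curr_pos = hall_pos
--
--         step = 1 if ROOM_POSITION[amphipod] > hall_pos else -1
--         energy_used = 0
--         is_collision = False
--
--         while curr_pos != ROOM_POSITION[amphipod]:
--             curr_pos += step
--             energy_used += AMPHIPOD_ENERGY_COST[amphipod]
--             if hallway[curr_pos] != '.':
--                 is_collision = True
--                 break
--         if is_collision:
--             continue
--
--         energy_used += (per_room - room_occupancy) * \
--             AMPHIPOD_ENERGY_COST[amphipod]
--
--         next_hallway = copy.deepcopy(hallway)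
--         next_hallway[hall_pos] = '.'
--
--         next_rooms = copy.deepcopy(rooms)
--         next_rooms[target_room] = [amphipod, *next_rooms[target_room]]
--
--         yield (energy_used, (next_hallway, next_rooms))
-- ===== SOURCE B (Python) =====
-- import copy
--
-- AMPHIPOD_ENERGY_COST = {'A': 1, 'B': 10, 'C': 100, 'D': 1000}
--
-- ROOM_POSITION = {'A': 2, 'B': 4, 'C': 6, 'D': 8}
--
-- def next_hallway_moves(state, per_room):
--     hallway, rooms = state
--
--     for hall_pos, amphipod in enumerate(hallway):
--         if amphipod == '.':
--             continue
--
--         target_room = 'ABCD'.index(amphipod)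
--         room = rooms[target_room]
--
--         if len(room) == per_room:
--             continue
--
--         if room and any(pod != amphipod for pod in room):
--             continue
--
--         target = ROOM_POSITION[amphipod]
--
--         # closed-form collision window: every cell strictly between hall_pos
--         # and the room entrance, entrance included
--         if target > hall_pos:
--             window = hallway[hall_pos + 1:target + 1]
--         else:
--             window = hallway[target:hall_pos]
--         if any(cell != '.' for cell in window):
--             continue
--
--         cost = AMPHIPOD_ENERGY_COST[amphipod]
--         energy_used = (abs(target - hall_pos) + per_room - len(room)) * cost
--
--         next_hallway = copy.deepcopy(hallway)
--         next_hallway[hall_pos] = '.'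
--
--         next_rooms = copy.deepcopy(rooms)
--         next_rooms[target_room] = [amphipod, *next_rooms[target_room]]
--
--         yield (energy_used, (next_hallway, next_rooms))
-- ===== Notes on version B (the rewrite author's own statement) =====
-- stated objective: simpler
-- what changed: A's inner while-loop that walks the hallway one cell at a time (accumulating energy and checking each cell for a collision) is replaced by a closed-form check: one hallway slice between the amphipod and its room entrance (entrance included) tested for any occupied cell, plus a closed-form energy formula (|target-pos| + per_room - occupancy) * cost.
import Mathlib
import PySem

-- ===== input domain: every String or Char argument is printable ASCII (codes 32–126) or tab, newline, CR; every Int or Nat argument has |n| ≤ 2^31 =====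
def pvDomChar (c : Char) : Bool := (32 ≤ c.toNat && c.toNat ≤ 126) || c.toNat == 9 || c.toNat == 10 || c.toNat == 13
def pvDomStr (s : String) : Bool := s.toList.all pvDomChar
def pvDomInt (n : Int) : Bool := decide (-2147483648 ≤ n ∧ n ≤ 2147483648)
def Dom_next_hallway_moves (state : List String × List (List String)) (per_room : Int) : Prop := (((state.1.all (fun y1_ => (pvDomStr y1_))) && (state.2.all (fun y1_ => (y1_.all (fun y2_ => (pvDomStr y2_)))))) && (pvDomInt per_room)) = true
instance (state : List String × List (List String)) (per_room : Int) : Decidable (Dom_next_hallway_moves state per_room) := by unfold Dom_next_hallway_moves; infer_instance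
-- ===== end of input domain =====

-- B replaces A's cell-by-cell while-loop walk toward the room with a closed-form
-- collision window (one hallway slice) and a closed-form energy formula (objective: simpler).

-- ===== PORT A =====

-- 'ABCD'.index(amphipod): none = ValueError
def pvIdx? (s : String) : Option Int :=
  let f := PySem.Str.find "ABCD" s
  if f = -1 then none else some f

-- ROOM_POSITION[s]: none = KeyError
def pvRoomPos? (s : String) : Option Int :=
  if s = "A" then some 2 else if s = "B" then some 4
  else if s = "C" then some 6 else if s = "D" then some 8 else none

-- AMPHIPOD_ENERGY_COST[s]: none = KeyError (same key set as ROOM_POSITION)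
def pvCost? (s : String) : Option Int :=
  if s = "A" then some 1 else if s = "B" then some 10
  else if s = "C" then some 100 else if s = "D" then some 1000 else none

-- A's while-loop: one cell per step toward the target (n = remaining steps),
-- accumulating energy; none = IndexError, the Bool is is_collision
def pvWalkA (hallway : List String) (cost step : Int) : Nat → Int → Int → Option (Int × Bool)
  | 0, _, energy => some (energy, false)
  | n + 1, curr, energy =>
    match PySem.List.pyGet? hallway (curr + step) with
    | none => none
    | some cell =>
      if cell ≠ "." then some (energy + cost, true)
      else pvWalkA hallway cost step n (curr + step) (energy + cost)

def pvGoA (hallway : List String) (rooms : List (List String)) (per_room : Int) :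
    List (Int × String) → List (Int × (List String × List (List String)))
  | [] => []
  | (i, amph) :: rest =>
    if amph = "." then pvGoA hallway rooms per_room rest
    else
      match pvIdx? amph with
      | none => []
      | some t =>
        match PySem.List.pyGet? rooms t with
        | none => []
        | some room =>
          if ((room.length : Int) = per_room) then pvGoA hallway rooms per_room rest
          else if (0 < room.length ∧ room.any (fun pod => pod != amph) = true) then
            pvGoA hallway rooms per_room rest
          else
            match pvRoomPos? amph, pvCost? amph with
            | some target, some cost =>
              match pvWalkA hallway cost (if target > i then 1 else -1) (target - i).natAbs i 0 with
              | none => []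
              | some (_, true) => pvGoA hallway rooms per_room rest
              | some (e, false) =>
                (e + (per_room - (room.length : Int)) * cost,
                  (PySem.List.pySetD hallway i ".",
                   PySem.List.pySetD rooms t (amph :: room))) :: pvGoA hallway rooms per_room rest
            | _, _ => []

def next_hallway_moves (state : List String × List (List String)) (per_room : Int) : List (Int × (List String × List (List String))) :=
  pvGoA state.1 state.2 per_room (PySem.List.enumerate state.1)

-- ===== PORT B =====

def pvGoB (hallway : List String) (rooms : List (List String)) (per_room : Int) :
    List (Int × String) → List (Int × (List String × List (List String)))
  | [] => []
  | (i, amph) :: rest =>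
    if amph = "." then pvGoB hallway rooms per_room rest
    else
      match pvIdx? amph with
      | none => []
      | some t =>
        match PySem.List.pyGet? rooms t with
        | none => []
        | some room =>
          if ((room.length : Int) = per_room) then pvGoB hallway rooms per_room rest
          else if (room ≠ [] ∧ room.any (fun pod => pod != amph) = true) then
            pvGoB hallway rooms per_room rest
          else
            match pvRoomPos? amph with
            | none => []
            | some target =>
              if (if target > i then PySem.List.slice hallway (some (i + 1)) (some (target + 1))
                  else PySem.List.slice hallway (some target) (some i)).any
                    (fun cell => cell != ".") = true then pvGoB hallway rooms per_room rest
              else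
                match pvCost? amph with
                | none => []
                | some cost =>
                  ((((target - i).natAbs : Int) + per_room - (room.length : Int)) * cost,
                    (PySem.List.pySetD hallway i ".",
                     PySem.List.pySetD rooms t (amph :: room))) :: pvGoB hallway rooms per_room rest

def next_hallway_moves_alt (state : List String × List (List String)) (per_room : Int) : List (Int × (List String × List (List String))) :=
  pvGoB state.1 state.2 per_room (PySem.List.enumerate state.1)

-- ===== PRECONDITION & SPEC =====

-- one hallway cell is fine iff A raises nothing while handling it: '.' cells are skipped;
-- any other cell must be a substring of 'ABCD' (else ValueError) whose room index exists
-- (else IndexError), and unless a guard skips it, its walk must stay inside the hallway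
-- or meet an occupied cell before stepping outside (else KeyError/IndexError)
def pvPreCell (hallway : List String) (rooms : List (List String)) (per_room : Int)
    (i : Int) (c : String) : Bool :=
  (c == ".") ||
  (match pvIdx? c with
   | none => false
   | some t =>
     match PySem.List.pyGet? rooms t with
     | none => false
     | some room =>
       ((room.length : Int) == per_room) || room.any (fun pod => pod != c) ||
       (match pvRoomPos? c with
        | none => false
        | some target =>
          decide (target < (hallway.length : Int)) ||
          (PySem.List.enumerate hallway).any (fun q => decide (i < q.1) && (q.2 != "."))))

-- Pre_ holds exactly when the Python A returns normally (raises no exception)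
def Pre_next_hallway_moves (state : List String × List (List String)) (per_room : Int) : Prop :=
  (PySem.List.enumerate state.1).all (fun p => pvPreCell state.1 state.2 per_room p.1 p.2) = true

instance (state : List String × List (List String)) (per_room : Int) : Decidable (Pre_next_hallway_moves state per_room) := by unfold Pre_next_hallway_moves; infer_instance

def pvWitness_next_hallway_moves : (List String × List (List String)) × Int :=
  (([".", ".", "A"], [[], [], [], []]), 2)

def Spec_next_hallway_moves (state : List String × List (List String)) (per_room : Int) (out : List (Int × (List String × List (List String)))) : Prop := out = next_hallway_moves_alt state per_room
instance (state : List String × List (List String)) (per_room : Int) (out : List (Int × (List String × List (List String)))) : Decidable (Spec_next_hallway_moves state per_room out) := by unfold Spec_next_hallway_moves; infer_instance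

-- ===== CLAIM (what is proved, stated in full; the proofs are below) =====
def Claim_equal_next_hallway_moves : Prop := ∀ (state : List String × List (List String)) (per_room : Int), Dom_next_hallway_moves state per_room → Pre_next_hallway_moves state per_room → Spec_next_hallway_moves state per_room (next_hallway_moves state per_room)

-- ===== LEMMAS AND PROOFS =====

-- walking DOWN (step = -1): all n visited cells are inside the hallway; the walk
-- collides iff the n cells just below curr contain a non-'.' cell, else it succeeds
lemma pv_walk_down (h : List String) (cost : Int) :
    ∀ (n : Nat) (curr e : Int), (n : Int) ≤ curr → curr ≤ (h.length : Int) →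
      (((h.drop (curr.toNat - n)).take n).any (fun c => c != ".") = true →
          ∃ e', pvWalkA h cost (-1) n curr e = some (e', true)) ∧
      (((h.drop (curr.toNat - n)).take n).any (fun c => c != ".") = false →
          pvWalkA h cost (-1) n curr e = some (e + n * cost, false)) := by
  intro n
  induction n with
  | zero =>
    intro curr e h1 h2
    refine ⟨fun hany => by simp at hany, fun _ => by simp [pvWalkA]⟩
  | succ n ih =>
    intro curr e h1 h2
    have hidx : curr.toNat - 1 < h.length := by omega
    have hget : PySem.List.pyGet? h (curr + -1) = some (h[curr.toNat - 1]) := by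
      have := PySem.List.pyGet?_eq_some_getElem (xs := h) (i := curr + -1) (by omega) (by omega)
      simpa [show (curr + -1).toNat = curr.toNat - 1 by omega] using this
    have hw : ((h.drop (curr.toNat - (n+1))).take (n+1))
        = ((h.drop ((curr - 1).toNat - n)).take n) ++ [h[curr.toNat - 1]] := by
      rw [List.take_add_one]
      have h2' : (h.drop (curr.toNat - (n+1)))[n]? = some (h[curr.toNat - 1]) := by
        rw [List.getElem?_drop]
        rw [List.getElem?_eq_getElem (by omega)]
        simp only [Option.some.injEq]
        exact getElem_congr rfl (by omega) (by omega)
      rw [h2']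
      simp only [Option.toList_some]
      have hdd : (curr - 1).toNat - n = curr.toNat - (n+1) := by omega
      rw [hdd]
    constructor
    · intro hany
      rw [hw, List.any_append] at hany
      simp only [pvWalkA, hget]
      by_cases hcell : h[curr.toNat - 1] = "."
      · rw [if_neg (by simp [hcell])]
        have hany' : ((h.drop ((curr - 1).toNat - n)).take n).any (fun c => c != ".") = true := by
          simp [hcell] at hany; simpa using hany
        obtain ⟨e', he'⟩ := (ih (curr - 1) (e + cost) (by omega) (by omega)).1 hany'
        exact ⟨e', by simpa [show curr + -1 = curr - 1 by ring] using he'⟩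
      · rw [if_pos (by simp [hcell])]
        exact ⟨e + cost, rfl⟩
    · intro hno
      rw [hw, List.any_append] at hno
      simp only [Bool.or_eq_false_iff] at hno
      have hcell : h[curr.toNat - 1] = "." := by
        have := hno.2; simpa using this
      simp only [pvWalkA, hget]
      rw [if_neg (by simp [hcell])]
      have := (ih (curr - 1) (e + cost) (by omega) (by omega)).2 hno.1
      rw [show curr + -1 = curr - 1 by ring]
      rw [this]
      congr 1
      rw [Prod.mk.injEq]
      exact ⟨by push_cast; ring, rfl⟩

-- walking UP (step = 1) entirely inside the hallway: same characterisation
lemma pv_walk_up (h : List String) (cost : Int) :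
    ∀ (n : Nat) (curr e : Int), 0 ≤ curr → curr + (n:Int) < (h.length : Int) →
      (((h.drop (curr.toNat + 1)).take n).any (fun c => c != ".") = true →
          ∃ e', pvWalkA h cost 1 n curr e = some (e', true)) ∧
      (((h.drop (curr.toNat + 1)).take n).any (fun c => c != ".") = false →
          pvWalkA h cost 1 n curr e = some (e + n * cost, false)) := by
  intro n
  induction n with
  | zero =>
    intro curr e h1 h2
    refine ⟨fun hany => by simp at hany, fun _ => by simp [pvWalkA]⟩
  | succ n ih =>
    intro curr e h1 h2
    have hidx : curr.toNat + 1 < h.length := by omega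
    have hget : PySem.List.pyGet? h (curr + 1) = some (h[curr.toNat + 1]'(by omega)) := by
      have := PySem.List.pyGet?_eq_some_getElem (xs := h) (i := curr + 1) (by omega) (by omega)
      simpa [show (curr + 1).toNat = curr.toNat + 1 by omega] using this
    have hw : ((h.drop (curr.toNat + 1)).take (n+1))
        = h[curr.toNat + 1]'(by omega) :: ((h.drop (curr.toNat + 2)).take n) := by
      rw [List.drop_eq_getElem_cons (by omega)]
      rfl
    constructor
    · intro hany
      rw [hw, List.any_cons] at hany
      simp only [pvWalkA, hget]
      by_cases hcell : h[curr.toNat + 1]'(by omega) = "."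
      · rw [if_neg (by simp [hcell])]
        have hany' : ((h.drop (curr.toNat + 2)).take n).any (fun c => c != ".") = true := by
          simp [hcell] at hany; simpa using hany
        obtain ⟨e', he'⟩ := (ih (curr + 1) (e + cost) (by omega) (by omega)).1
          (by simpa [show (curr + 1).toNat + 1 = curr.toNat + 2 by omega] using hany')
        exact ⟨e', he'⟩
      · rw [if_pos (by simp [hcell])]
        exact ⟨e + cost, rfl⟩
    · intro hno
      rw [hw, List.any_cons] at hno
      simp only [Bool.or_eq_false_iff] at hno
      have hcell : h[curr.toNat + 1]'(by omega) = "." := by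
        have := hno.1; simpa using this
      simp only [pvWalkA, hget]
      rw [if_neg (by simp [hcell])]
      have := (ih (curr + 1) (e + cost) (by omega) (by omega)).2
        (by simpa [show (curr + 1).toNat + 1 = curr.toNat + 2 by omega] using hno.2)
      rw [this]
      congr 1
      rw [Prod.mk.injEq]
      exact ⟨by push_cast; ring, rfl⟩

-- walking UP toward an occupied cell always collides before leaving the hallway
lemma pv_walk_up_bad (h : List String) (cost : Int) :
    ∀ (n : Nat) (curr e : Int), 0 ≤ curr → (h.length : Int) ≤ curr + n →
      (∃ j : Nat, curr < (j : Int) ∧ ∃ (hj : j < h.length), h[j] ≠ ".") →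
      ∃ e', pvWalkA h cost 1 n curr e = some (e', true) := by
  intro n
  induction n with
  | zero =>
    intro curr e h1 h2 ⟨j, hj1, hj2, _⟩
    exfalso; omega
  | succ n ih =>
    intro curr e h1 h2 ⟨j, hj1, hj2, hj3⟩
    have hidx : curr.toNat + 1 < h.length := by omega
    have hget : PySem.List.pyGet? h (curr + 1) = some (h[curr.toNat + 1]'(by omega)) := by
      have := PySem.List.pyGet?_eq_some_getElem (xs := h) (i := curr + 1) (by omega) (by omega)
      simpa [show (curr + 1).toNat = curr.toNat + 1 by omega] using this
    simp only [pvWalkA, hget]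
    by_cases hcell : h[curr.toNat + 1]'(by omega) = "."
    · rw [if_neg (by simp [hcell])]
      refine ih (curr + 1) (e + cost) (by omega) (by omega) ⟨j, ?_, hj2, hj3⟩
      by_contra hle
      have : j = curr.toNat + 1 := by omega
      exact hj3 (by rw [← hcell]; exact getElem_congr rfl this hj2)
    · rw [if_pos (by simp [hcell])]
      exact ⟨e + cost, rfl⟩

lemma pvRoomPos?_some {s : String} {t : Int} (h : pvRoomPos? s = some t) :
    0 ≤ t ∧ ∃ c, pvCost? s = some c := by
  unfold pvRoomPos? at h
  unfold pvCost?
  split_ifs at h <;> simp_all <;> omega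

-- A's loop and B's loop agree cell by cell
theorem pv_go_eq (hallway : List String) (rooms : List (List String)) (per_room : Int) :
    ∀ l : List (Int × String),
      (∀ p ∈ l, p ∈ PySem.List.enumerate hallway) →
      (∀ p ∈ l, pvPreCell hallway rooms per_room p.1 p.2 = true) →
      pvGoA hallway rooms per_room l = pvGoB hallway rooms per_room l := by
  intro l
  induction l with
  | nil => intro _ _; rfl
  | cons p rest ih =>
    intro hl hp
    obtain ⟨i, amph⟩ := p
    have hrec := ih (fun q hq => hl q (List.mem_cons_of_mem _ hq))
      (fun q hq => hp q (List.mem_cons_of_mem _ hq))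
    have hmem := hl (i, amph) (List.mem_cons_self ..)
    rw [PySem.List.mem_enumerate_iff] at hmem
    obtain ⟨k, hk, hpk⟩ := hmem
    have hi : i = (k : Int) := by simpa using congrArg Prod.fst hpk
    have hi0 : 0 ≤ i := by omega
    have hil : i < (hallway.length : Int) := by rw [hi]; exact_mod_cast hk
    have hpre := hp (i, amph) (List.mem_cons_self ..)
    simp only [pvGoA, pvGoB]
    by_cases hdot : amph = "."
    · rw [if_pos hdot, if_pos hdot]; exact hrec
    rw [if_neg hdot, if_neg hdot]
    cases hix : pvIdx? amph with
    | none => rfl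
    | some t =>
    simp only []
    cases hroomq : PySem.List.pyGet? rooms t with
    | none => rfl
    | some room =>
    simp only []
    by_cases g1 : (room.length : Int) = per_room
    · rw [if_pos g1, if_pos g1]; exact hrec
    rw [if_neg g1, if_neg g1]
    by_cases g2 : room.any (fun pod => pod != amph) = true
    · have hne : room ≠ [] := by intro hnil; subst hnil; simp at g2
      have hpos : 0 < room.length := List.length_pos_iff.mpr hne
      rw [if_pos ⟨hpos, g2⟩, if_pos ⟨hne, g2⟩]; exact hrec
    rw [if_neg (fun hc => g2 hc.2), if_neg (fun hc => g2 hc.2)]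
    cases hrp : pvRoomPos? amph with
    | none => cases hcq : pvCost? amph <;> rfl
    | some target =>
    simp only []
    obtain ⟨ht0, c, hcq⟩ := pvRoomPos?_some hrp
    rw [hcq]
    simp only []
    -- simplify the precondition for this cell
    have hpre' : decide (target < (hallway.length : Int)) = true ∨
        (PySem.List.enumerate hallway).any (fun q => decide (i < q.1) && (q.2 != ".")) = true := by
      simp only [pvPreCell, hix, hroomq, hrp] at hpre
      have hd : (amph == ".") = false := by simpa using hdot
      have hg1 : ((room.length : Int) == per_room) = false := by simpa using g1
      have hg2 : room.any (fun pod => pod != amph) = false := by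
        simpa using g2
      rw [hd, hg1, hg2] at hpre
      simpa using hpre
    by_cases hcmp : target > i
    · -- walking up
      simp only [if_pos hcmp]
      have hn : (((target - i).natAbs : Nat) : Int) = target - i := by omega
      have hsl : PySem.List.slice hallway (some (i + 1)) (some (target + 1))
          = (hallway.drop (i.toNat + 1)).take ((target - i).natAbs) := by
        rw [show i + 1 = ((k + 1 : Nat) : Int) by omega,
            show target + 1 = ((target.toNat + 1 : Nat) : Int) by omega,
            PySem.List.slice_natCast]
        congr 1
        · omega
        · congr 1
          omega
      rw [hsl]
      by_cases hlen : target < (hallway.length : Int)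
      · have hup := pv_walk_up hallway c ((target - i).natAbs) i 0 hi0 (by omega)
        by_cases hany : ((hallway.drop (i.toNat + 1)).take ((target - i).natAbs)).any
            (fun x => x != ".") = true
        · obtain ⟨e', he'⟩ := hup.1 hany
          rw [he']
          simp only []
          rw [if_pos hany]
          exact hrec
        · have hfalse := Bool.eq_false_iff.mpr hany
          have hok := hup.2 hfalse
          rw [hok]
          simp only []
          rw [if_neg (by simp [hfalse])]
          rw [hrec]
          congr 1
          rw [Prod.mk.injEq]
          exact ⟨by push_cast; ring, rfl⟩
      · -- target beyond the hallway: Pre gives an occupied cell on the way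
        have hbad : ∃ j : Nat, i < (j : Int) ∧ ∃ (hj : j < hallway.length), hallway[j] ≠ "." := by
          rcases hpre' with hlt | hany
          · exact absurd (of_decide_eq_true hlt) hlen
          · rw [List.any_eq_true] at hany
            obtain ⟨q, hq, hqc⟩ := hany
            rw [PySem.List.mem_enumerate_iff] at hq
            obtain ⟨k', hk', hq'⟩ := hq
            subst hq'
            simp only [Bool.and_eq_true, decide_eq_true_eq, bne_iff_ne] at hqc
            exact ⟨k', by simpa using hqc.1, hk', hqc.2⟩
        obtain ⟨j, hj1, hj2, hj3⟩ := hbad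
        obtain ⟨e', he'⟩ := pv_walk_up_bad hallway c ((target - i).natAbs) i 0 hi0
          (by omega) ⟨j, hj1, hj2, hj3⟩
        rw [he']
        simp only []
        have hany : ((hallway.drop (i.toNat + 1)).take ((target - i).natAbs)).any
            (fun x => x != ".") = true := by
          rw [List.any_eq_true]
          refine ⟨hallway[j], ?_, by simpa using hj3⟩
          apply List.mem_of_getElem? (i := j - (i.toNat + 1))
          rw [List.getElem?_take_of_lt (by omega), List.getElem?_drop]
          rw [List.getElem?_eq_getElem (by omega)]
          simp only [Option.some.injEq]
          exact getElem_congr rfl (by omega) (by omega)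
        rw [if_pos hany]
        exact hrec
    · -- walking down (or already at the target column)
      simp only [if_neg hcmp]
      have hn : (((target - i).natAbs : Nat) : Int) = i - target := by omega
      have hsl : PySem.List.slice hallway (some target) (some i)
          = (hallway.drop (i.toNat - (target - i).natAbs)).take ((target - i).natAbs) := by
        rw [show target = ((target.toNat : Nat) : Int) by omega,
            show i = ((k : Nat) : Int) by omega,
            PySem.List.slice_natCast]
        congr 1
        · omega
        · congr 1
          omega
      rw [hsl]
      have hdn := pv_walk_down hallway c ((target - i).natAbs) i 0 (by omega) (by omega)
      by_cases hany : ((hallway.drop (i.toNat - (target - i).natAbs)).take ((target - i).natAbs)).any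
          (fun x => x != ".") = true
      · obtain ⟨e', he'⟩ := hdn.1 hany
        rw [he']
        simp only []
        rw [if_pos hany]
        exact hrec
      · have hfalse := Bool.eq_false_iff.mpr hany
        have hok := hdn.2 hfalse
        rw [hok]
        simp only []
        rw [if_neg (by simp [hfalse])]
        rw [hrec]
        congr 1
        rw [Prod.mk.injEq]
        exact ⟨by push_cast; ring, rfl⟩

-- ===== VERDICT (by name: the statement is the Claim_ definition above) =====
theorem next_hallway_moves_spec : Claim_equal_next_hallway_moves := by
  intro state per_room _hdom hpre
  unfold Spec_next_hallway_moves next_hallway_moves next_hallway_moves_alt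
  unfold Pre_next_hallway_moves at hpre
  exact pv_go_eq state.1 state.2 per_room _ (fun p hp => hp)
    (fun p hp => List.all_eq_true.mp hpre p hp)
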